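-- pv_equiv track=rewrite | github.com/khaledghazi/Interview-Training | findSubstrings.py | solution
-- ===== SOURCE A (Python) =====
-- class Trie(object):
--     def __init__(self):
--         self.nxt = {}
--         self.end = False
--
--     def add(self, word):
--         if not word:
--             self.end = True
--         else:
--             self.nxt.setdefault(word[0], Trie()).add(word[1:])
--
--     def __repr__(self, level = 0):
--         lines = []
--         if self.end:
--             lines.append("end")
--         for k, v in self.nxt.items():
--             lines.append("%s -> %s" % (k, repr(v)))
--         return "    " * level + "\n".join(lines)
--
-- def solution(words, parts):
--     trie = Trie()
--     for x in parts:
--         trie.add(x)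
--     for i, w in enumerate(words):
--         pos = len(w)
--         L = -1
--         for j in range(len(w)):
--             t = trie
--             k = j
--             while k < len(w) and w[k] in t.nxt:
--                 t = t.nxt[w[k]]
--                 k += 1
--                 if t.end and k - j > L:
--                     L = k - j
--                     pos = j
--         if L > 0:
--             words[i] = "%s[%s]%s" % (w[:pos], w[pos:pos+L], w[pos+L:])
--     return words
-- ===== SOURCE B (Python) =====
-- def solution(words, parts):
--     # Bracket the longest (earliest on ties) part occurring in each word.
--     # No trie: per position, scan the nonempty parts directly with startswith.
--     ps = [p for p in parts if p]
--     res = []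
--     for w in words:
--         L = 0
--         pos = 0
--         for j in range(len(w)):
--             m = 0
--             for p in ps:
--                 if len(p) > m and w.startswith(p, j):
--                     m = len(p)
--             if m > L:
--                 L = m
--                 pos = j
--         res.append(w if L == 0 else w[:pos] + "[" + w[pos:pos + L] + "]" + w[pos + L:])
--     return res
-- ===== Notes on version B (the rewrite author's own statement) =====
-- stated objective: alternative
-- what changed: B drops A's hand-built trie entirely: for each word it scans every position and checks each nonempty part directly with str.startswith, keeping the longest (earliest on ties) match; A builds a character trie from the parts and walks it from every position.
import Mathlib
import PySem

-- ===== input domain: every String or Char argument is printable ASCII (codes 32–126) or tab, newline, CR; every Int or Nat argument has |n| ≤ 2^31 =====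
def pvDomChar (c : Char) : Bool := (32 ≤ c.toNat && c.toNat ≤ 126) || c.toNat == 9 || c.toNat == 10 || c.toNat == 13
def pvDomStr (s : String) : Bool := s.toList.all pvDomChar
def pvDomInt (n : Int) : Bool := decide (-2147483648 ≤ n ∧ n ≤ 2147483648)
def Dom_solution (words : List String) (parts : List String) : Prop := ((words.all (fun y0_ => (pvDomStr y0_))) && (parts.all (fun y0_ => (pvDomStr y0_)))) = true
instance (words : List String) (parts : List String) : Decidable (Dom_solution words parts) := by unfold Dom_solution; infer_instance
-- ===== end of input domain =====

-- B replaces A's hand-built trie walk by a direct per-position scan of the (nonempty) parts;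
-- objective: alternative (same task, no trie).  NOTE: Python A mutates `words` in place and
-- returns it; the equivalence proved here is about the RETURN value (B builds a fresh list).

-- ===== PORT A =====
-- A Trie node is (end flag, children dict Char -> Trie in insertion order); the dict is the
-- inductive PChildren (entry `cons c e ch rest` maps c to the node (e, ch)), a node is PTrie.
inductive PChildren where
  | nil : PChildren
  | cons : Char → Bool → PChildren → PChildren → PChildren
deriving DecidableEq, Repr

structure PTrie where
  end_ : Bool
  ch : PChildren
deriving DecidableEq, Repr

-- dict lookup: `t.nxt[c]` / `c in t.nxt`
def childFind : PChildren → Char → Option PTrie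
  | .nil, _ => none
  | .cons c' e ch tl, c => if c' = c then some ⟨e, ch⟩ else childFind tl c

-- Trie.add; setdefault appends a fresh node at the end of the dict when the key is absent
mutual
def trieAdd : PTrie → List Char → PTrie
  | t, [] => ⟨true, t.ch⟩
  | t, c :: rest => ⟨t.end_, childAdd t.ch c rest⟩
  termination_by _ w => (w.length, 1, 0)
def childAdd : PChildren → Char → List Char → PChildren
  | .nil, c, rest =>
      let t := trieAdd ⟨false, .nil⟩ rest
      .cons c t.end_ t.ch .nil
  | .cons c' e ch tl, c, rest =>
      if c' = c then
        let t := trieAdd ⟨e, ch⟩ rest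
        .cons c' t.end_ t.ch tl
      else .cons c' e ch (childAdd tl c rest)
  termination_by ch _ rest => (rest.length + 1, 0, sizeOf ch)
end

-- the inner `while k < len(w) and w[k] in t.nxt:` loop; (L, pos) are Python ints
def walkA (t : PTrie) (w : List Char) (j k : Nat) (L pos : Int) : Int × Int :=
  if h : k < w.length then
    match childFind t.ch w[k] with
    | some t' =>
        if t'.end_ && decide (((k : Int) + 1 - j) > L) then
          walkA t' w j (k + 1) ((k : Int) + 1 - j) (j : Int)
        else
          walkA t' w j (k + 1) L pos
    | none => (L, pos)
  else (L, pos)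
termination_by w.length - k

-- body of `for i, w in enumerate(words)` (the in-place words[i] = … becomes a map)
def wordA (trie : PTrie) (w : List Char) : List Char :=
  let st := (List.range w.length).foldl
      (fun (s : Int × Int) j => walkA trie w j j s.1 s.2) ((-1 : Int), (w.length : Int))
  if st.1 > 0 then
    -- "%s[%s]%s" % (w[:pos], w[pos:pos+L], w[pos+L:]); in this branch 0 ≤ pos and 0 < L
    w.take st.2.toNat ++ '[' :: (w.drop st.2.toNat).take st.1.toNat
      ++ ']' :: w.drop (st.2.toNat + st.1.toNat)
  else w

def solution (words : List String) (parts : List String) : List String :=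
  let trie := parts.foldl (fun t p => trieAdd t p.toList) ⟨false, .nil⟩
  words.map (fun s => String.ofList (wordA trie s.toList))

-- ===== PORT B =====
-- inner `for p in ps: if len(p) > m and w.startswith(p, j): m = len(p)`
def maxAtB (ps : List (List Char)) (w : List Char) (j : Nat) : Nat :=
  ps.foldl (fun m p => if decide (p.length > m) && p.isPrefixOf (w.drop j) then p.length else m) 0

def wordB (ps : List (List Char)) (w : List Char) : List Char :=
  let st := (List.range w.length).foldl
      (fun (s : Nat × Nat) j => let m := maxAtB ps w j; if m > s.1 then (m, j) else s) (0, 0)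
  if st.1 = 0 then w
  else
    w.take st.2 ++ '[' :: (w.drop st.2).take st.1 ++ ']' :: w.drop (st.2 + st.1)

def solution_alt (words : List String) (parts : List String) : List String :=
  let ps := (parts.map String.toList).filter (fun p => p ≠ [])
  words.map (fun s => String.ofList (wordB ps s.toList))

-- ===== PRECONDITION & SPEC =====
def Spec_solution (words : List String) (parts : List String) (out : List String) : Prop := out = solution_alt words parts
instance (words : List String) (parts : List String) (out : List String) : Decidable (Spec_solution words parts out) := by unfold Spec_solution; infer_instance

-- ===== CLAIM (what is proved, stated in full; the proofs are below) =====
def Claim_equal_solution : Prop := ∀ (words : List String) (parts : List String), Dom_solution words parts → Spec_solution words parts (solution words parts)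

-- ===== LEMMAS AND PROOFS =====

-- endAt t q: walk path q from t, read the end flag (false if the path is missing)
def endAt : PTrie → List Char → Bool
  | t, [] => t.end_
  | t, c :: q =>
      match childFind t.ch c with
      | none => false
      | some t' => endAt t' q

-- longest m ≥ 1 with endAt t (s.take m) (0 if none): the value A's inner walk discovers
def best : PTrie → List Char → Nat
  | _, [] => 0
  | t, c :: s =>
      match childFind t.ch c with
      | none => 0
      | some t' =>
          let b := best t' s
          if b > 0 then b + 1 else if t'.end_ then 1 else 0

def childD (ch : PChildren) (c : Char) : PTrie := (childFind ch c).getD ⟨false, .nil⟩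

theorem childFind_childAdd (ch : PChildren) (c : Char) (q : List Char) (d : Char) :
    childFind (childAdd ch c q) d =
      if c = d then some (trieAdd (childD ch c) q) else childFind ch d := by
  induction ch with
  | nil =>
      by_cases h : c = d <;> simp [childAdd, childFind, childD, h]
  | cons c' e ch tl _ ih =>
      by_cases h1 : c' = c
      · subst h1
        by_cases h2 : c' = d <;> simp [childAdd, childFind, childD, h2]
      · by_cases h2 : c' = d
        · subst h2
          have hne : ¬ c = c' := fun h => h1 h.symm
          simp [childAdd, childFind, h1, hne]
        · simp [childAdd, childFind, childD, h1, h2, ih]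

theorem endAt_emptyT (p : List Char) : endAt ⟨false, .nil⟩ p = false := by
  cases p <;> simp [endAt, childFind]

theorem endAt_childD (t : PTrie) (c : Char) (p : List Char) :
    endAt t (c :: p) = endAt (childD t.ch c) p := by
  simp only [endAt, childD]
  cases h : childFind t.ch c with
  | none => simp [endAt_emptyT]
  | some t' => simp

theorem endAt_trieAdd (q : List Char) : ∀ (t : PTrie) (p : List Char),
    endAt (trieAdd t q) p = (endAt t p || decide (q = p)) := by
  induction q with
  | nil =>
      intro t p
      cases p with
      | nil => simp [trieAdd, endAt]
      | cons d p' => simp [trieAdd, endAt]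
  | cons c q' ih =>
      intro t p
      cases p with
      | nil => simp [trieAdd, endAt]
      | cons d p' =>
          have hL : endAt (trieAdd t (c :: q')) (d :: p')
              = match childFind (childAdd t.ch c q') d with
                | none => false
                | some t' => endAt t' p' := by
            simp [trieAdd, endAt]
          rw [hL, childFind_childAdd]
          by_cases h : c = d
          · subst h
            rw [if_pos rfl]
            show endAt (trieAdd (childD t.ch c) q') p' = _
            rw [ih (childD t.ch c) p', endAt_childD t c p']
            simp
          · have hne : ¬ (c :: q' = d :: p') := by simp [h]
            simp only [if_neg h, endAt, hne, decide_false, Bool.or_false]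

theorem endAt_build (qs : List (List Char)) : ∀ (t : PTrie) (p : List Char),
    endAt (qs.foldl (fun t q => trieAdd t q) t) p
      = (endAt t p || qs.any (fun q => decide (q = p))) := by
  induction qs with
  | nil => intro t p; simp
  | cons q qs ih =>
      intro t p
      simp only [List.foldl_cons, List.any_cons]
      rw [ih, endAt_trieAdd]
      cases endAt t p <;> simp

-- best is 0 or an achieved match length …
theorem best_achieved : ∀ (s : List Char) (t : PTrie),
    best t s = 0 ∨ (0 < best t s ∧ best t s ≤ s.length ∧ endAt t (s.take (best t s)) = true) := by
  intro s
  induction s with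
  | nil => intro t; left; simp [best]
  | cons c s' ih =>
      intro t
      simp only [best]
      cases h : childFind t.ch c with
      | none => left; rfl
      | some t' =>
          rcases ih t' with h0 | ⟨hb, hle, hend⟩
          · simp only [h0]
            by_cases he : t'.end_
            · right
              refine ⟨by simp [he], by simp [he], ?_⟩
              simp [he, List.take_succ_cons, endAt, h]
            · left; simp [he]
          · right
            simp only [if_pos hb]
            refine ⟨Nat.succ_pos _, by simpa using Nat.succ_le_succ hle, ?_⟩
            simp [List.take_succ_cons, endAt, h, hend]

-- … and dominates every match length
theorem best_ge : ∀ (s : List Char) (t : PTrie) (m : Nat),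
    0 < m → m ≤ s.length → endAt t (s.take m) = true → m ≤ best t s := by
  intro s
  induction s with
  | nil => intro t m hm hle _; simp at hle; omega
  | cons c s' ih =>
      intro t m hm hle hend
      obtain ⟨m', rfl⟩ : ∃ m', m = m' + 1 := ⟨m - 1, by omega⟩
      simp only [List.take_succ_cons, endAt] at hend
      cases h : childFind t.ch c with
      | none => rw [h] at hend; exact absurd hend (by simp)
      | some t' =>
          rw [h] at hend
          simp only [best, h]
          by_cases hm' : 0 < m'
          · have hb' := ih t' m' hm' (by simpa using hle) hend
            have hb : 0 < best t' s' := lt_of_lt_of_le hm' hb'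
            simp only [if_pos hb]
            omega
          · have hm0 : m' = 0 := by omega
            subst hm0
            simp only [List.take_zero, endAt] at hend
            by_cases hb : best t' s' > 0
            · simp only [if_pos hb]; omega
            · simp [hb, hend]

-- same two facts for B's per-position scan
theorem maxAtB_facts (ps : List (List Char)) (w : List Char) (j : Nat) :
    (maxAtB ps w j = 0 ∨ ∃ p ∈ ps, p.length = maxAtB ps w j ∧ p.isPrefixOf (w.drop j)) ∧
    (∀ p ∈ ps, p.isPrefixOf (w.drop j) → p.length ≤ maxAtB ps w j) := by
  unfold maxAtB
  generalize w.drop j = s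
  suffices H : ∀ (l : List (List Char)) (a : Nat),
      (a ≤ l.foldl (fun m p => if decide (p.length > m) && p.isPrefixOf s then p.length else m) a) ∧
      (l.foldl (fun m p => if decide (p.length > m) && p.isPrefixOf s then p.length else m) a = a ∨
        ∃ p ∈ l, p.length = l.foldl (fun m p => if decide (p.length > m) && p.isPrefixOf s then p.length else m) a ∧ p.isPrefixOf s) ∧
      (∀ p ∈ l, p.isPrefixOf s → p.length ≤ l.foldl (fun m p => if decide (p.length > m) && p.isPrefixOf s then p.length else m) a) by
    obtain ⟨-, h2, h3⟩ := H ps 0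
    exact ⟨h2, h3⟩
  intro l
  induction l with
  | nil => intro a; simp
  | cons p l ih =>
      intro a
      simp only [List.foldl_cons, List.mem_cons]
      by_cases hc : (decide (p.length > a) && p.isPrefixOf s) = true
      · simp only [if_pos hc]
        obtain ⟨i1, i2, i3⟩ := ih p.length
        simp only [Bool.and_eq_true, decide_eq_true_eq] at hc
        refine ⟨by omega, ?_, ?_⟩
        · rcases i2 with h | ⟨q, hq, hql, hqp⟩
          · exact Or.inr ⟨p, Or.inl rfl, h.symm, hc.2⟩
          · exact Or.inr ⟨q, Or.inr hq, hql, hqp⟩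
        · rintro q (rfl | hq) hqs
          · exact i1
          · exact i3 q hq hqs
      · simp only [if_neg hc]
        obtain ⟨i1, i2, i3⟩ := ih a
        refine ⟨i1, ?_, ?_⟩
        · rcases i2 with h | ⟨q, hq, hql, hqp⟩
          · exact Or.inl h
          · exact Or.inr ⟨q, Or.inr hq, hql, hqp⟩
        · rintro q (rfl | hq) hqs
          · simp only [Bool.and_eq_true, decide_eq_true_eq, not_and] at hc
            by_cases hl : q.length > a
            · exact absurd hqs (by simpa using hc hl)
            · omega
          · exact i3 q hq hqs

-- membership characterisation of the built trie
theorem endAt_iff (parts : List String) (q : List Char) :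
    endAt (parts.foldl (fun t p => trieAdd t p.toList) ⟨false, .nil⟩) q = true ↔
      ∃ p ∈ parts, p.toList = q := by
  have h1 : parts.foldl (fun t p => trieAdd t p.toList) ⟨false, .nil⟩
      = (parts.map String.toList).foldl (fun t q => trieAdd t q) ⟨false, .nil⟩ := by
    rw [List.foldl_map]
  rw [h1, endAt_build, endAt_emptyT]
  simp

-- best of the built trie = B's per-position scan
theorem best_eq_maxAtB (parts : List String) (w : List Char) (j : Nat) :
    best (parts.foldl (fun t p => trieAdd t p.toList) ⟨false, .nil⟩) (w.drop j)
      = maxAtB ((parts.map String.toList).filter (fun p => p ≠ [])) w j := by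
  set T := parts.foldl (fun t p => trieAdd t p.toList) (⟨false, .nil⟩ : PTrie) with hT
  set ps := (parts.map String.toList).filter (fun p => p ≠ []) with hps
  obtain ⟨hach, hdom⟩ := maxAtB_facts ps w j
  apply Nat.le_antisymm
  · rcases best_achieved (w.drop j) T with h0 | ⟨hb, hle, hend⟩
    · omega
    · rw [endAt_iff] at hend
      obtain ⟨p, hp, hpq⟩ := hend
      have hlenp : p.toList.length = best T (List.drop j w) := by
        rw [hpq, List.length_take]
        omega
      have hmem : p.toList ∈ ps := by
        rw [hps]
        refine List.mem_filter.mpr ⟨List.mem_map_of_mem hp, ?_⟩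
        simp only [ne_eq, decide_eq_true_eq]
        intro hnil
        rw [hnil] at hlenp
        simp at hlenp
        omega
      have hpre : p.toList.isPrefixOf (w.drop j) := by
        rw [List.isPrefixOf_iff_prefix, hpq]
        exact List.take_prefix _ _
      have := hdom _ hmem hpre
      omega
  · rcases hach with h0 | ⟨p, hp, hlen, hpre⟩
    · omega
    · rw [hps, List.mem_filter] at hp
      obtain ⟨hpP, hpne⟩ := hp
      obtain ⟨q, hq, rfl⟩ := List.mem_map.mp hpP
      rw [List.isPrefixOf_iff_prefix] at hpre
      have hle : q.toList.length ≤ (w.drop j).length := hpre.length_le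
      have htake : (w.drop j).take q.toList.length = q.toList := (List.prefix_iff_eq_take.mp hpre).symm
      have hpos : 0 < q.toList.length := by
        cases hq' : q.toList with
        | nil => rw [hq'] at hpne; simp at hpne
        | cons a b => simp
      have := best_ge (w.drop j) T q.toList.length hpos hle (by
        rw [htake, endAt_iff]
        exact ⟨q, hq, rfl⟩)
      omega

-- the inner walk computes exactly `best`
theorem walkA_eq : ∀ (t : PTrie) (w : List Char) (j k : Nat) (L pos : Int),
    walkA t w j k L pos =
      (if 0 < best t (w.drop k) ∧ ((k : Int) - j + best t (w.drop k) > L)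
       then (((k : Int) - j + best t (w.drop k)), (j : Int)) else (L, pos)) := by
  intro t w j k L pos
  fun_induction walkA t w j k L pos with
  | case1 t k L pos h t' hfind hcond ih =>
      rw [ih]
      have hdrop : w.drop k = w[k] :: w.drop (k + 1) := (List.getElem_cons_drop h).symm
      rw [hdrop]
      simp only [best, hfind]
      simp only [Bool.and_eq_true, decide_eq_true_eq] at hcond
      obtain ⟨he, hgt⟩ := hcond
      split_ifs
      all_goals try simp_all only [Prod.mk.injEq, true_and, and_true, false_and,
        not_false_iff]
      all_goals push_cast at *
      all_goals try have hB := (‹True ∧ _›).2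
      all_goals try exact absurd ⟨trivial, by omega⟩ ‹¬(True ∧ _)›
      all_goals omega
  | case2 t k L pos h t' hfind hcond ih =>
      rw [ih]
      have hdrop : w.drop k = w[k] :: w.drop (k + 1) := (List.getElem_cons_drop h).symm
      rw [hdrop]
      simp only [best, hfind]
      simp only [Bool.and_eq_true, decide_eq_true_eq, not_and] at hcond
      split_ifs
      all_goals try simp_all only [Prod.mk.injEq, true_and, and_true, false_and,
        not_false_iff]
      all_goals push_cast at *
      all_goals try exact (‹False ∧ _›).1.elim
      all_goals try have hA := ‹True → ¬_› trivial
      all_goals try have hB := (‹True ∧ _›).2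
      all_goals omega
  | case3 t k L pos h hfind =>
      have hdrop : w.drop k = w[k] :: w.drop (k + 1) := (List.getElem_cons_drop h).symm
      rw [hdrop]
      simp only [best, hfind]
      rw [if_neg (by omega)]
  | case4 t k L pos h =>
      rw [List.drop_eq_nil_of_le (by omega)]
      simp only [best]
      rw [if_neg (by omega)]

-- relating the two outer folds
def ABrel (n : Nat) (a : Int × Int) (b : Nat × Nat) : Prop :=
  (b.1 = 0 ∧ a = ((-1 : Int), (n : Int))) ∨ (0 < b.1 ∧ a.1 = (b.1 : Int) ∧ a.2 = (b.2 : Int))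

theorem fold_rel (parts : List String) (w : List Char) :
    ∀ (js : List Nat) (a : Int × Int) (b : Nat × Nat),
      ABrel w.length a b →
      ABrel w.length
        (js.foldl (fun (s : Int × Int) j =>
            walkA (parts.foldl (fun t p => trieAdd t p.toList) ⟨false, .nil⟩) w j j s.1 s.2) a)
        (js.foldl (fun (s : Nat × Nat) j =>
            let m := maxAtB ((parts.map String.toList).filter (fun p => p ≠ [])) w j
            if m > s.1 then (m, j) else s) b) := by
  intro js
  induction js with
  | nil => intro a b h; exact h
  | cons j js ih =>
      intro a b h
      simp only [List.foldl_cons]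
      apply ih
      rw [walkA_eq]
      rw [best_eq_maxAtB]
      set m := maxAtB ((parts.map String.toList).filter (fun p => p ≠ [])) w j with hm
      rcases h with ⟨hb0, ha⟩ | ⟨hb, ha1, ha2⟩
      · rw [ha]
        by_cases hmp : 0 < m
        · rw [if_pos ⟨hmp, by push_cast; omega⟩]
          simp only [hb0]
          rw [if_pos (by omega)]
          right
          refine ⟨hmp, by push_cast; ring, by push_cast; ring⟩
        · rw [if_neg (by omega), if_neg (by omega)]
          left
          exact ⟨hb0, rfl⟩
      · by_cases hmp : m > b.1
        · rw [if_pos ⟨by omega, by rw [ha1]; omega⟩, if_pos hmp]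
          right
          refine ⟨by omega, by push_cast; ring, by push_cast; ring⟩
        · rw [if_neg (by rw [ha1]; push_cast at *; omega), if_neg hmp]
          right
          exact ⟨hb, ha1, ha2⟩

theorem wrap_eq (w : List Char) (sa : Int × Int) (sb : Nat × Nat)
    (h : ABrel w.length sa sb) :
    (if sa.1 > 0 then
        w.take sa.2.toNat ++ '[' :: (w.drop sa.2.toNat).take sa.1.toNat
          ++ ']' :: w.drop (sa.2.toNat + sa.1.toNat)
      else w)
    = (if sb.1 = 0 then w
       else w.take sb.2 ++ '[' :: (w.drop sb.2).take sb.1 ++ ']' :: w.drop (sb.2 + sb.1)) := by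
  rcases h with ⟨hb0, ha⟩ | ⟨hb, ha1, ha2⟩
  · rw [ha, hb0]
    norm_num
  · rw [ha1, ha2, if_pos (by omega), if_neg (by omega)]
    simp

theorem word_eq (parts : List String) (w : List Char) :
    wordA (parts.foldl (fun t p => trieAdd t p.toList) ⟨false, .nil⟩) w
      = wordB ((parts.map String.toList).filter (fun p => p ≠ [])) w := by
  simp only [wordA, wordB]
  exact wrap_eq w _ _ (fold_rel parts w (List.range w.length) ((-1 : Int), (w.length : Int))
    (0, 0) (Or.inl ⟨rfl, rfl⟩))

-- ===== VERDICT (by name: the statement is the Claim_ definition above) =====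
theorem solution_spec : Claim_equal_solution := by
  intro words parts _
  unfold Spec_solution solution solution_alt
  simp only []
  apply List.map_congr_left
  intro s _
  rw [word_eq]
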